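-- pv_equiv track=rewrite | github.com/baiyumo2003/InventoryGBT | src/dataset/create_dataset.py | distance_to_next_one
-- ===== SOURCE A (Python) =====
-- def distance_to_next_one(binary_list):
--     n = len(binary_list)
--     result = [999] * n
--     next_one_idx = -1
--
--     for i in range(n - 1, 0, -1):
--         if binary_list[i] == 1:
--             result[i] = 0
--             next_one_idx = i
--         elif next_one_idx != -1:
--             result[i] = next_one_idx - i
--
--     return result
-- ===== SOURCE B (Python) =====
-- def distance_to_next_one(binary_list):
--     n = len(binary_list)
--     result = [999] * n
--     start = 1  # index 0 is never assigned (the original loop stops before 0)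
--     while True:
--         try:
--             p = binary_list.index(1, start)
--         except ValueError:
--             break
--         result[start:p + 1] = range(p - start, -1, -1)
--         start = p + 1
--     return result
-- ===== Notes on version B (the rewrite author's own statement) =====
-- stated objective: alternative
-- what changed: A walks every index right-to-left carrying next_one_idx; B instead jumps between the positions of 1s found by list.index(1, start) and fills each whole gap with a single slice assignment of a range, never visiting indices one by one in Python code.
import Mathlib
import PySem

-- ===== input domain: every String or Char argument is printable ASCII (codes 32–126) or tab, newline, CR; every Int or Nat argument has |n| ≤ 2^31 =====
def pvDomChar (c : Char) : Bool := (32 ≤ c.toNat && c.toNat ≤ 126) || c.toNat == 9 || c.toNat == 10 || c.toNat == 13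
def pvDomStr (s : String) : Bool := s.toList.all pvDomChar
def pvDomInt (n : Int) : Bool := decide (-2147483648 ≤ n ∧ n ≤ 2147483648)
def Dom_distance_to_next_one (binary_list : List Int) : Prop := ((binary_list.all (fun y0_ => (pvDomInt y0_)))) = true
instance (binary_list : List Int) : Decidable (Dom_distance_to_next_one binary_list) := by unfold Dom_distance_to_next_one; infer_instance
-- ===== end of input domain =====

-- B replaces A's per-index backward scan by an index-table strategy: it jumps between the
-- positions of 1s with list.index(1, start) and fills each gap with one slice assignment;
-- same return value on every input (alternative decomposition, not claimed faster).

-- ===== PORT A =====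
-- Port of A: backward scan carrying the index of the nearest 1 seen so far.
-- `binary_list[i]` has i ∈ [1, n-1], always in range, so the pyGetD default is never used.
def pvStepA (binary_list : List Int) (st : List Int × Int) (i : Int) : List Int × Int :=
  if PySem.List.pyGetD binary_list i 0 == 1 then
    (st.1.set i.toNat 0, i)
  else if st.2 ≠ -1 then
    (st.1.set i.toNat (st.2 - i), st.2)
  else st

def distance_to_next_one (binary_list : List Int) : List Int :=
  ((PySem.List.pyRange ((binary_list.length : Int) - 1) 0 (-1)).foldl (pvStepA binary_list)
    (List.replicate binary_list.length 999, -1)).1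

-- ===== PORT B =====
-- Port of B: jump from 1 to 1 with list.index(1, start) and fill each segment by slice assignment.
-- `binary_list.index(1, start)`: first j ≥ start with xs[j] == 1; none = ValueError (hand port, exact).
def pvIndexFrom? (xs : List Int) (v : Int) (start : Nat) : Option Nat :=
  ((xs.drop start).findIdx? (fun x => x == v)).map (fun d => start + d)

-- termination helper for pvGoB (a found index lies in [start, xs.length))
lemma pvIndexFrom?_lt {xs : List Int} {v : Int} {s p : Nat}
    (h : pvIndexFrom? xs v s = some p) : s ≤ p ∧ p < xs.length := by
  unfold pvIndexFrom? at h
  rcases Option.map_eq_some_iff.mp h with ⟨d, hd, rfl⟩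
  rcases List.findIdx?_eq_some_iff_findIdx_eq.mp hd with ⟨hlt, -⟩
  simp [List.length_drop] at hlt
  omega

-- `result[start:p+1] = range(p - start, -1, -1)` (slice assignment; start ≤ p + 1 ≤ len here)
def pvFillSeg (res : List Int) (start p : Nat) : List Int :=
  res.take start ++ PySem.List.pyRange ((p : Int) - (start : Int)) (-1) (-1) ++ res.drop (p + 1)

-- the `while True:` loop of B
def pvGoB (bl res : List Int) (start : Nat) : List Int :=
  match h : pvIndexFrom? bl 1 start with
  | none => res
  | some p => pvGoB bl (pvFillSeg res start p) (p + 1)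
termination_by bl.length - start
decreasing_by have := pvIndexFrom?_lt h; omega

def distance_to_next_one_alt (binary_list : List Int) : List Int :=
  pvGoB binary_list (List.replicate binary_list.length 999) 1

-- ===== PRECONDITION & SPEC =====
def Spec_distance_to_next_one (binary_list : List Int) (out : List Int) : Prop := out = distance_to_next_one_alt binary_list
instance (binary_list : List Int) (out : List Int) : Decidable (Spec_distance_to_next_one binary_list out) := by unfold Spec_distance_to_next_one; infer_instance

-- ===== CLAIM (what is proved, stated in full; the proofs are below) =====
def Claim_equal_distance_to_next_one : Prop := ∀ (binary_list : List Int), Dom_distance_to_next_one binary_list → Spec_distance_to_next_one binary_list (distance_to_next_one binary_list)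

-- ===== LEMMAS AND PROOFS =====

-- the common semantic anchor: entry j of the answer (999 at j = 0; distance to the next 1 otherwise)
def pvFinal (bl : List Int) (j : Nat) : Int :=
  if j = 0 then 999 else
    match pvIndexFrom? bl 1 j with
    | some p => (p : Int) - (j : Int)
    | none => 999

def pvSpecList (bl : List Int) : List Int := (List.range bl.length).map (pvFinal bl)

-- A's next_one_idx as a function of the threshold
def pvNxt (bl : List Int) (i : Nat) : Int :=
  match pvIndexFrom? bl 1 i with | some p => (p : Int) | none => -1

lemma pvIdx_some_iff {xs : List Int} {v : Int} {s p : Nat} :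
    pvIndexFrom? xs v s = some p ↔
      s ≤ p ∧ xs[p]? = some v ∧ ∀ k, s ≤ k → k < p → xs[k]? ≠ some v := by
  unfold pvIndexFrom?
  constructor
  · intro h
    rcases Option.map_eq_some_iff.mp h with ⟨d, hd, rfl⟩
    rcases List.findIdx?_eq_some_iff_getElem.mp hd with ⟨hlt, hv, hprior⟩
    have hlen : s + d < xs.length := by simp [List.length_drop] at hlt; omega
    refine ⟨by omega, ?_, ?_⟩
    · rw [List.getElem?_eq_getElem hlen]
      have : (xs.drop s)[d]'hlt = xs[s + d]'hlen := List.getElem_drop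
      rw [this] at hv
      simp at hv ⊢; omega
    · intro k hk1 hk2
      have hk3 : k - s < (xs.drop s).length := by simp [List.length_drop]; omega
      have := hprior (k - s) (by omega)
      have h2 : (xs.drop s)[k - s]'hk3 = xs[k]'(by omega) := by
        rw [List.getElem_drop]; congr 1; omega
      rw [h2] at this
      rw [List.getElem?_eq_getElem (by omega : k < xs.length)]
      simp only [beq_iff_eq] at this
      simp [this]
  · rintro ⟨hsp, hv, hno⟩
    have hlen : p < xs.length := by
      by_contra hc
      rw [List.getElem?_eq_none (by omega)] at hv
      simp at hv
    have hveq : xs[p]'hlen = v := by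
      rw [List.getElem?_eq_getElem hlen] at hv
      exact Option.some_inj.mp hv
    have hd : (xs.drop s).findIdx? (fun x => x == v) = some (p - s) := by
      rw [List.findIdx?_eq_some_iff_getElem]
      have hlt : p - s < (xs.drop s).length := by simp [List.length_drop]; omega
      refine ⟨hlt, ?_, ?_⟩
      · have : (xs.drop s)[p - s]'hlt = xs[p]'hlen := by
          rw [List.getElem_drop]; congr 1; omega
        rw [this, hveq]
        simp
      · intro j hj
        have hjl : s + j < xs.length := by omega
        have := hno (s + j) (by omega) (by omega)
        rw [List.getElem?_eq_getElem hjl] at this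
        have h2 : (xs.drop s)[j]'(by simp [List.length_drop]; omega) = xs[s + j]'hjl :=
          List.getElem_drop
        rw [h2]
        simpa using this
    rw [hd]
    simp
    omega

lemma pvIdx_none_iff {xs : List Int} {v : Int} {s : Nat} :
    pvIndexFrom? xs v s = none ↔ ∀ k, s ≤ k → xs[k]? ≠ some v := by
  unfold pvIndexFrom?
  rw [Option.map_eq_none_iff, List.findIdx?_eq_none_iff]
  constructor
  · intro h k hk hcon
    have hkl : k < xs.length := by
      by_contra hc
      rw [List.getElem?_eq_none (by omega)] at hcon
      simp at hcon
    have hmem : xs[k]'hkl ∈ xs.drop s := by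
      rw [List.mem_iff_getElem]
      exact ⟨k - s, by simp [List.length_drop]; omega, by rw [List.getElem_drop]; congr 1; omega⟩
    have := h _ hmem
    rw [List.getElem?_eq_getElem hkl] at hcon
    have hveq : xs[k]'hkl = v := Option.some_inj.mp hcon
    simp [hveq] at this
  · intro h x hx
    rcases List.mem_iff_getElem.mp hx with ⟨j, hj, rfl⟩
    have hjl : s + j < xs.length := by simp [List.length_drop] at hj; omega
    have := h (s + j) (by omega)
    rw [List.getElem?_eq_getElem hjl] at this
    have h2 : (xs.drop s)[j]'hj = xs[s + j]'hjl := List.getElem_drop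
    rw [h2]
    simpa using this

lemma pvIdx_ge {xs : List Int} {v : Int} {s : Nat} (h : xs.length ≤ s) :
    pvIndexFrom? xs v s = none := by
  rw [pvIdx_none_iff]
  intro k hk
  rw [List.getElem?_eq_none (by omega)]
  intro hc; simp at hc

lemma pvIdx_step {xs : List Int} {v : Int} {s : Nat} (h : s < xs.length) :
    pvIndexFrom? xs v s = if xs[s]? = some v then some s else pvIndexFrom? xs v (s + 1) := by
  unfold pvIndexFrom?
  rw [List.drop_eq_getElem_cons h, List.findIdx?_cons]
  rw [List.getElem?_eq_getElem h]
  by_cases hv : xs[s]'h = v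
  · simp [hv]
  · simp only [beq_iff_eq, hv]
    rw [if_neg (by simp), if_neg (by simp [hv])]
    cases (xs.drop (s + 1)).findIdx? (fun x => x == v) with
    | none => simp
    | some d => simp; omega

lemma pvIdx_mono_none {xs : List Int} {v : Int} {s t : Nat}
    (h : pvIndexFrom? xs v s = none) (hst : s ≤ t) : pvIndexFrom? xs v t = none := by
  rw [pvIdx_none_iff] at h ⊢
  exact fun k hk => h k (by omega)

lemma pv_set_map_range (f : Nat → Int) (n i : Nat) (x : Int) :
    ((List.range n).map f).set i x = (List.range n).map (fun j => if j = i then x else f j) := by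
  apply List.ext_getElem
  · simp
  · intro j h1 h2
    simp only [List.getElem_set, List.getElem_map, List.getElem_range] at *
    split
    · next heq => simp [heq.symm]
    · next hne => rw [if_neg (by omega)]

lemma pv_map_range_congr {f g : Nat → Int} {n : Nat} (h : ∀ j, j < n → f j = g j) :
    (List.range n).map f = (List.range n).map g := by
  apply List.map_congr_left
  intro a ha
  exact h a (List.mem_range.mp ha)

lemma pvA_loop (bl : List Int) : ∀ (i : Nat), i < bl.length →
    ∀ res nxt, res = (List.range bl.length).map (fun j => if i < j then pvFinal bl j else 999) →
    nxt = pvNxt bl (i + 1) →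
    ((PySem.List.pyRange (i : Int) 0 (-1)).foldl (pvStepA bl) (res, nxt)).1 = pvSpecList bl := by
  intro i
  induction i with
  | zero =>
    intro _ res nxt hres hnxt
    rw [PySem.List.pyRange_neg_one_eq_nil (by norm_num)]
    simp only [List.foldl_nil]
    rw [hres]
    unfold pvSpecList
    apply pv_map_range_congr
    intro j hj
    by_cases h0 : 0 < j
    · simp [h0]
    · have hj0 : j = 0 := by omega
      simp [hj0, pvFinal]
  | succ m ih =>
    intro hlen res nxt hres hnxt
    have hm1 : ((m + 1 : Nat) : Int) = ((m : Nat) : Int) + 1 := by push_cast; ring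
    have hcons : PySem.List.pyRange ((m + 1 : Nat) : Int) 0 (-1)
        = ((m + 1 : Nat) : Int) :: PySem.List.pyRange ((m : Nat) : Int) 0 (-1) := by
      rw [PySem.List.pyRange_neg_one_cons (by omega)]
      norm_num
    rw [hcons, List.foldl_cons]
    have hgetd : PySem.List.pyGetD bl ((m + 1 : Nat) : Int) 0 = bl[m + 1]'hlen := by
      rw [PySem.List.pyGetD_natCast, List.getD_eq_getElem bl 0 hlen]
    have hsome : bl[m + 1]? = some (bl[m + 1]'hlen) := List.getElem?_eq_getElem hlen
    have htona : (((m + 1 : Nat) : Int)).toNat = m + 1 := by omega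
    by_cases hb : bl[m + 1]'hlen = 1
    · -- binary_list[m+1] == 1
      have hidx : pvIndexFrom? bl 1 (m + 1) = some (m + 1) := by
        rw [pvIdx_step hlen, if_pos (by rw [hsome, hb])]
      have hstep : pvStepA bl (res, nxt) ((m + 1 : Nat) : Int)
          = (res.set (m + 1) 0, ((m + 1 : Nat) : Int)) := by
        unfold pvStepA
        rw [hgetd]
        simp [hb]
      rw [hstep]
      apply ih (by omega)
      · rw [hres, pv_set_map_range]
        apply pv_map_range_congr
        intro j hj
        by_cases hjm : j = m + 1
        · subst hjm
          rw [if_pos rfl, if_pos (by omega)]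
          unfold pvFinal
          rw [if_neg (by omega), hidx]
          push_cast
          ring
        · rw [if_neg hjm]
          by_cases hlt : m < j
          · rw [if_pos hlt, if_pos (by omega)]
          · rw [if_neg hlt, if_neg (by omega)]
      · unfold pvNxt
        rw [hidx]
    · -- binary_list[m+1] != 1
      have hbne : bl[m + 1]? ≠ some 1 := by
        rw [hsome]
        intro hc
        exact hb (Option.some_inj.mp hc)
      have hidx : pvIndexFrom? bl 1 (m + 1) = pvIndexFrom? bl 1 (m + 2) := by
        rw [pvIdx_step hlen, if_neg hbne]
      by_cases hn : nxt = -1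
      · -- next_one_idx == -1 : no change
        have hnone : pvIndexFrom? bl 1 (m + 1 + 1) = none := by
          unfold pvNxt at hnxt
          cases hcase : pvIndexFrom? bl 1 (m + 1 + 1) with
          | none => rfl
          | some p =>
            rw [hcase] at hnxt
            simp at hnxt
            rw [hnxt] at hn
            omega
        have hstep : pvStepA bl (res, nxt) ((m + 1 : Nat) : Int) = (res, nxt) := by
          unfold pvStepA
          rw [hgetd]
          simp [hb, hn]
        rw [hstep]
        apply ih (by omega)
        · rw [hres]
          apply pv_map_range_congr
          intro j hj
          by_cases hjm : j = m + 1
          · subst hjm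
            rw [if_neg (by omega), if_pos (by omega)]
            unfold pvFinal
            rw [if_neg (by omega), hidx, hnone]
          · by_cases hlt : m < j
            · rw [if_pos (by omega), if_pos hlt]
            · rw [if_neg (by omega), if_neg hlt]
        · unfold pvNxt
          rw [hidx, hnone]
          unfold pvNxt at hnxt
          rw [hnone] at hnxt
          exact hnxt
      · -- next_one_idx != -1
        obtain ⟨p, hp⟩ : ∃ p, pvIndexFrom? bl 1 (m + 1 + 1) = some p := by
          unfold pvNxt at hnxt
          cases hcase : pvIndexFrom? bl 1 (m + 1 + 1) with
          | none =>
            rw [hcase] at hnxt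
            simp at hnxt
            exact absurd hnxt hn
          | some p => exact ⟨p, rfl⟩
        have hnxtp : nxt = (p : Int) := by
          unfold pvNxt at hnxt
          rw [hp] at hnxt
          exact hnxt
        have hidxp : pvIndexFrom? bl 1 (m + 1) = some p := by rw [hidx, hp]
        have hstep : pvStepA bl (res, nxt) ((m + 1 : Nat) : Int)
            = (res.set (m + 1) (nxt - ((m + 1 : Nat) : Int)), nxt) := by
          unfold pvStepA
          rw [hgetd]
          simp [hb, hn]
        rw [hstep]
        apply ih (by omega)
        · rw [hres, pv_set_map_range]
          apply pv_map_range_congr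
          intro j hj
          by_cases hjm : j = m + 1
          · subst hjm
            rw [if_pos rfl, if_pos (by omega)]
            unfold pvFinal
            rw [if_neg (by omega), hidxp, hnxtp]
          · rw [if_neg hjm]
            by_cases hlt : m < j
            · rw [if_pos hlt, if_pos (by omega)]
            · rw [if_neg hlt, if_neg (by omega)]
        · unfold pvNxt
          rw [hidxp, hnxtp]

lemma pvA_eq (bl : List Int) : distance_to_next_one bl = pvSpecList bl := by
  unfold distance_to_next_one
  rcases Nat.eq_zero_or_pos bl.length with hn | hn
  · rw [PySem.List.pyRange_neg_one_eq_nil (by omega)]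
    simp only [List.foldl_nil]
    unfold pvSpecList
    simp [hn]
  · have hcast : ((bl.length : Int) - 1) = (((bl.length - 1 : Nat)) : Int) := by omega
    rw [hcast]
    apply pvA_loop bl (bl.length - 1) (by omega)
    · rw [show List.replicate bl.length (999 : Int)
          = (List.range bl.length).map (fun _ => (999 : Int)) by
        rw [List.map_const']; rw [List.length_range]]
      apply pv_map_range_congr
      intro j hj
      rw [if_neg (by omega)]
    · unfold pvNxt
      rw [show bl.length - 1 + 1 = bl.length by omega, pvIdx_ge (le_refl _)]

lemma pvFill_eq (bl res : List Int) (start p : Nat) (h1 : 1 ≤ start)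
    (hsp : start ≤ p) (hpl : p < bl.length) (hp1 : bl[p]? = some 1)
    (hno : ∀ k, start ≤ k → k < p → bl[k]? ≠ some 1)
    (hres : res = (List.range bl.length).map (fun j => if start ≤ j then 999 else pvFinal bl j)) :
    pvFillSeg res start p =
      (List.range bl.length).map (fun j => if p + 1 ≤ j then 999 else pvFinal bl j) := by
  subst hres
  have hfin : ∀ j, start ≤ j → j ≤ p → pvFinal bl j = (p : Int) - (j : Int) := by
    intro j hj1 hj2
    unfold pvFinal
    rw [if_neg (by omega)]
    rw [pvIdx_some_iff.mpr ⟨hj2, hp1, fun k hk1 hk2 => hno k (by omega) hk2⟩]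
  have harg : (((p : Int) - (start : Int)) - (-1)).toNat = p - start + 1 := by omega
  unfold pvFillSeg
  rw [PySem.List.pyRange_neg_one, harg]
  apply List.ext_getElem
  · simp
    omega
  · intro j hj1 hj2
    simp only [List.length_append, List.length_take, List.length_map, List.length_range,
      List.length_drop] at hj1 hj2
    rw [List.getElem_append]
    split
    · next hA =>
      simp only [List.length_append, List.length_take, List.length_map, List.length_range] at hA
      rw [List.getElem_append]
      split
      · next hB =>
        -- j < start
        simp only [List.length_take, List.length_map, List.length_range] at hB
        rw [List.getElem_take, List.getElem_map, List.getElem_range,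
          List.getElem_map, List.getElem_range]
        rw [if_neg (by omega), if_neg (by omega)]
      · next hB =>
        -- start ≤ j ≤ p : the filled segment
        simp only [List.length_take, List.length_map, List.length_range] at hB ⊢
        rw [List.getElem_map, List.getElem_range, List.getElem_map, List.getElem_range]
        rw [if_neg (by omega), hfin j (by omega) (by omega)]
        omega
    · next hA =>
      -- j > p
      simp only [List.length_append, List.length_take, List.length_map, List.length_range] at hA ⊢
      rw [List.getElem_drop, List.getElem_map, List.getElem_range,
        List.getElem_map, List.getElem_range]
      rw [if_pos (by omega), if_pos (by omega)]

lemma pvB_go (bl : List Int) : ∀ (res : List Int) (start : Nat), 1 ≤ start →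
    res = (List.range bl.length).map (fun j => if start ≤ j then 999 else pvFinal bl j) →
    pvGoB bl res start = pvSpecList bl := by
  intro res start
  induction res, start using pvGoB.induct (bl := bl) with
  | case1 res start hnone =>
    intro h1 hres
    rw [pvGoB.eq_def, hnone]
    rw [hres]
    unfold pvSpecList
    apply pv_map_range_congr
    intro j hj
    by_cases hjs : start ≤ j
    · rw [if_pos hjs]
      unfold pvFinal
      rw [if_neg (by omega), pvIdx_mono_none hnone hjs]
    · rw [if_neg hjs]
  | case2 res start p hsome ih =>
    intro h1 hres
    rw [pvGoB.eq_def, hsome]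
    rcases pvIdx_some_iff.mp hsome with ⟨hsp, hp1, hno⟩
    have hpl : p < bl.length := (pvIndexFrom?_lt hsome).2
    exact ih (by omega) (pvFill_eq bl res start p h1 hsp hpl hp1 hno hres)

lemma pvB_eq (bl : List Int) : distance_to_next_one_alt bl = pvSpecList bl := by
  unfold distance_to_next_one_alt
  apply pvB_go bl _ 1 (le_refl 1)
  rw [show List.replicate bl.length (999 : Int)
      = (List.range bl.length).map (fun _ => (999 : Int)) by
    rw [List.map_const']; rw [List.length_range]]
  apply pv_map_range_congr
  intro j hj
  by_cases hjs : 1 ≤ j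
  · rw [if_pos hjs]
  · rw [if_neg hjs]
    unfold pvFinal
    rw [if_pos (by omega)]

-- ===== VERDICT (by name: the statement is the Claim_ definition above) =====
theorem distance_to_next_one_spec : Claim_equal_distance_to_next_one := by
  intro bl _
  unfold Spec_distance_to_next_one
  exact (pvA_eq bl).trans (pvB_eq bl).symm
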